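-- pv_equiv track=rewrite | github.com/sidghimire/MulitplayerChess | index.py | getBoxNumber
-- ===== SOURCE A (Python) =====
-- def getBoxNumber(x,y):
--     locationX=None
--     locationY=None
--     for i in range(8):
--         if (x>((i)*80) and x<((i+1)*80)):
--             locationX=i
--     for j in range(8):
--         if (y>((j)*80) and y<((j+1)*80)):
--             locationY=j
--     return((locationX,locationY))
-- ===== SOURCE B (Python) =====
-- def _box(v):
--     if 0 < v < 640 and v % 80 != 0:
--         return v // 80
--     return None
--
-- def getBoxNumber(x, y):
--     return (_box(x), _box(y))
-- ===== Notes on version B (the rewrite author's own statement) =====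
-- stated objective: simpler
-- what changed: Replaces the two 8-step bucket-scan loops with a direct closed-form: each coordinate's box is v // 80 when 0 < v < 640 and v is not a multiple of 80, else None.
import Mathlib
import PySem

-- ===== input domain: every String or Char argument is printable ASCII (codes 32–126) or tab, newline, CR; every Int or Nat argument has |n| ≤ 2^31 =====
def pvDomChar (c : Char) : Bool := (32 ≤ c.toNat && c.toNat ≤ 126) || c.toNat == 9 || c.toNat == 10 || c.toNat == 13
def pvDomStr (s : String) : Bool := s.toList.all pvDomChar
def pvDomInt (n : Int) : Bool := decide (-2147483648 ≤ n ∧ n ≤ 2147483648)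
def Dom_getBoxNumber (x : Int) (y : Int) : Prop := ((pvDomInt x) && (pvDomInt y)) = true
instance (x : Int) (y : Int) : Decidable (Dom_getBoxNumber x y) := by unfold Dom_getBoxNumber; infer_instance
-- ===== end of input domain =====

-- B replaces A's two 8-step bucket-scan loops with a direct guarded integer division (objective: simpler).

-- ===== PORT A =====
-- the 'for i in range(8)' loop accumulating locationX / locationY
def getBoxNumber (x : Int) (y : Int) : Option Int × Option Int :=
  let locationX := (PySem.List.pyRange 0 8 1).foldl
    (fun acc i => if x > i * 80 ∧ x < (i + 1) * 80 then some i else acc) none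
  let locationY := (PySem.List.pyRange 0 8 1).foldl
    (fun acc j => if y > j * 80 ∧ y < (j + 1) * 80 then some j else acc) none
  (locationX, locationY)

-- ===== PORT B =====
def boxOf (v : Int) : Option Int :=
  if 0 < v ∧ v < 640 ∧ PySem.Int.mod v 80 ≠ 0 then some (PySem.Int.floordiv v 80) else none

def getBoxNumber_alt (x : Int) (y : Int) : Option Int × Option Int :=
  (boxOf x, boxOf y)

-- ===== PRECONDITION & SPEC =====
def Spec_getBoxNumber (x : Int) (y : Int) (out : Option Int × Option Int) : Prop := out = getBoxNumber_alt x y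
instance (x : Int) (y : Int) (out : Option Int × Option Int) : Decidable (Spec_getBoxNumber x y out) := by unfold Spec_getBoxNumber; infer_instance

-- ===== CLAIM (what is proved, stated in full; the proofs are below) =====
def Claim_equal_getBoxNumber : Prop := ∀ (x : Int) (y : Int), Dom_getBoxNumber x y → Spec_getBoxNumber x y (getBoxNumber x y)

-- ===== LEMMAS AND PROOFS =====

-- the 8-iteration scan over buckets equals the guarded division
theorem scan_eq_boxOf (v : Int) :
    (PySem.List.pyRange 0 8 1).foldl
      (fun acc i => if v > i * 80 ∧ v < (i + 1) * 80 then some i else acc) none = boxOf v := by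
  have hr : PySem.List.pyRange 0 8 1 = [0, 1, 2, 3, 4, 5, 6, 7] := by decide
  rw [hr]
  simp only [List.foldl]
  unfold boxOf
  rw [PySem.Int.mod_eq_emod_of_pos (by omega), PySem.Int.floordiv_eq_ediv_of_pos (by omega)]
  split_ifs <;> first
    | rfl
    | · exfalso; omega
    | · congr 1; omega

theorem getBoxNumber_spec : Claim_equal_getBoxNumber := by
  intro x y _
  show getBoxNumber x y = getBoxNumber_alt x y
  unfold getBoxNumber getBoxNumber_alt
  rw [scan_eq_boxOf, scan_eq_boxOf]
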